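-- pv_equiv track=rewrite | github.com/abdul712/pairdish | scraper/rag_scraper.py | extract_dietary_tags
-- ===== SOURCE A (Python) =====
-- from typing import Dict, List
--
-- def extract_dietary_tags(text: str) -> List[str]:
--     """Extract dietary tags from text"""
--     tags = []
--     text_lower = text.lower()
--
--     if any(word in text_lower for word in ['vegetarian', 'veggie']):
--         tags.append('vegetarian')
--     if 'vegan' in text_lower:
--         tags.append('vegan')
--     if any(word in text_lower for word in ['gluten-free', 'gluten free']):
--         tags.append('gluten-free')
--
--     return tags
-- ===== SOURCE B (Python) =====
-- # Single left-to-right scan over text positions (prefix matching), instead of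
-- # one substring search per keyword; tags emitted from the found-set in fixed order.
-- KEYWORD_TAG = {
--     'vegetarian': 'vegetarian',
--     'veggie': 'vegetarian',
--     'vegan': 'vegan',
--     'gluten-free': 'gluten-free',
--     'gluten free': 'gluten-free',
-- }
--
-- def extract_dietary_tags(text: str):
--     """Extract dietary tags from text"""
--     t = text.lower()
--     found = set()
--     for i in range(len(t)):
--         for kw, tag in KEYWORD_TAG.items():
--             if t.startswith(kw, i):
--                 found.add(tag)
--     return [tag for tag in ('vegetarian', 'vegan', 'gluten-free') if tag in found]
-- ===== Notes on version B (the rewrite author's own statement) =====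
-- stated objective: alternative
-- what changed: Instead of running one substring search per hardcoded keyword branch, B makes a single left-to-right scan over the text positions, prefix-matching every keyword of a keyword-to-tag map at each position into a found-set, then emits the tags present in the set in the fixed tag order.
import Mathlib
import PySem

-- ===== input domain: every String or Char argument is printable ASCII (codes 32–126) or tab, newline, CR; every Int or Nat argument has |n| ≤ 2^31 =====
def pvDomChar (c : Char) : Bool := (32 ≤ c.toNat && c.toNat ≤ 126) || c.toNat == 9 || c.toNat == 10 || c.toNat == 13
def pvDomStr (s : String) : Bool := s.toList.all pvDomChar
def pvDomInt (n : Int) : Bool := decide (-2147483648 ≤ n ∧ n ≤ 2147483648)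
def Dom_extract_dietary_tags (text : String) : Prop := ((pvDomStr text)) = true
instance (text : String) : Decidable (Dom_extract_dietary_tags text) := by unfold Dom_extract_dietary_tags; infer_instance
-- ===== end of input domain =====

-- B replaces A's per-keyword substring searches with a single left-to-right scan over text positions that prefix-matches a keyword→tag map, then emits tags from the found-set in fixed order (alternative algorithm, same cost class).


-- ===== PORT A =====
def extract_dietary_tags (text : String) : List String :=
  let tags : List String := []
  let text_lower := PySem.Str.lower text
  let tags := if (["vegetarian", "veggie"].any (fun word => PySem.Str.isIn word text_lower))
              then tags ++ ["vegetarian"] else tags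
  let tags := if PySem.Str.isIn "vegan" text_lower then tags ++ ["vegan"] else tags
  let tags := if (["gluten-free", "gluten free"].any (fun word => PySem.Str.isIn word text_lower))
              then tags ++ ["gluten-free"] else tags
  tags

-- ===== PORT B =====
-- the KEYWORD_TAG dict of Source B (insertion order)
def pvKeywordTag : List (String × String) :=
  [("vegetarian", "vegetarian"), ("veggie", "vegetarian"), ("vegan", "vegan"),
   ("gluten-free", "gluten-free"), ("gluten free", "gluten-free")]

-- t.startswith(kw, i) with 0 ≤ i is exactly kw.toList <+: t.toList.drop i (hand port, exact on that domain)
def extract_dietary_tags_alt (text : String) : List String :=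
  let t := PySem.Str.lower text
  let found : PySem.Set String :=
    (List.range t.toList.length).foldl (fun found i =>
      pvKeywordTag.foldl (fun found p =>
        if p.1.toList.isPrefixOf (t.toList.drop i) then PySem.Set.add found p.2 else found)
        found)
      PySem.Set.empty
  ["vegetarian", "vegan", "gluten-free"].filter (fun tag => PySem.Set.contains found tag)

-- ===== PRECONDITION & SPEC =====
def Spec_extract_dietary_tags (text : String) (out : List String) : Prop := out = extract_dietary_tags_alt text
instance (text : String) (out : List String) : Decidable (Spec_extract_dietary_tags text out) := by unfold Spec_extract_dietary_tags; infer_instance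

-- ===== CLAIM (what is proved, stated in full; the proofs are below) =====
def Claim_equal_extract_dietary_tags : Prop := ∀ (text : String), Dom_extract_dietary_tags text → Spec_extract_dietary_tags text (extract_dietary_tags text)

-- ===== LEMMAS AND PROOFS =====

-- membership after the inner fold over a keyword list
theorem pv_inner_mem (kws : List (String × String)) (s : List Char) (acc : PySem.Set String)
    (tag : String) :
    tag ∈ kws.foldl (fun found p =>
        if p.1.toList.isPrefixOf s then PySem.Set.add found p.2 else found) acc ↔
    tag ∈ acc ∨ ∃ p ∈ kws, p.1.toList <+: s ∧ p.2 = tag := by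
  induction kws generalizing acc with
  | nil => simp
  | cons q kws ih =>
    simp only [List.foldl_cons]
    by_cases h : q.1.toList.isPrefixOf s
    · rw [if_pos h, ih]
      simp only [PySem.Set.mem_add]
      have hq : q.1.toList <+: s := List.isPrefixOf_iff_prefix.mp h
      constructor
      · rintro ((hm | hm) | ⟨p, hp, hpre, he⟩)
        · exact Or.inl hm
        · exact Or.inr ⟨q, List.mem_cons_self, hq, hm.symm⟩
        · exact Or.inr ⟨p, List.mem_cons_of_mem _ hp, hpre, he⟩
      · rintro (hm | ⟨p, hp, hpre, he⟩)
        · exact Or.inl (Or.inl hm)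
        · rcases List.mem_cons.mp hp with rfl | hp
          · exact Or.inl (Or.inr he.symm)
          · exact Or.inr ⟨p, hp, hpre, he⟩
    · rw [if_neg h, ih]
      constructor
      · rintro (hm | ⟨p, hp, hpre, he⟩)
        · exact Or.inl hm
        · exact Or.inr ⟨p, List.mem_cons_of_mem _ hp, hpre, he⟩
      · rintro (hm | ⟨p, hp, hpre, he⟩)
        · exact Or.inl hm
        · rcases List.mem_cons.mp hp with rfl | hp
          · exact absurd (List.isPrefixOf_iff_prefix.mpr hpre) h
          · exact Or.inr ⟨p, hp, hpre, he⟩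

-- membership in B's scan accumulator
theorem pv_found_mem (t : List Char) (n : Nat) (acc : PySem.Set String) (tag : String) :
    tag ∈ (List.range n).foldl (fun found i =>
      pvKeywordTag.foldl (fun found p =>
        if p.1.toList.isPrefixOf (t.drop i) then PySem.Set.add found p.2 else found) found) acc ↔
    tag ∈ acc ∨ ∃ i < n, ∃ p ∈ pvKeywordTag, p.1.toList <+: t.drop i ∧ p.2 = tag := by
  induction n generalizing acc with
  | zero => simp
  | succ n ih =>
    rw [List.range_succ, List.foldl_append, List.foldl_cons, List.foldl_nil, pv_inner_mem, ih]
    constructor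
    · rintro ((ha | ⟨i, hi, w⟩) | ⟨p, hp, hpre, he⟩)
      · exact Or.inl ha
      · exact Or.inr ⟨i, Nat.lt_succ_of_lt hi, w⟩
      · exact Or.inr ⟨n, Nat.lt_succ_self n, p, hp, hpre, he⟩
    · rintro (ha | ⟨i, hi, w⟩)
      · exact Or.inl (Or.inl ha)
      · rcases Nat.lt_succ_iff_lt_or_eq.mp hi with hi | rfl
        · exact Or.inl (Or.inr ⟨i, hi, w⟩)
        · exact Or.inr w

-- nonempty keyword: an occurrence anywhere is an occurrence starting before the end
theorem pv_exists_lt (kw t : List Char) (hk : kw ≠ []) :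
    (∃ i < t.length, kw <+: t.drop i) ↔ ∃ j, kw <+: t.drop j := by
  constructor
  · rintro ⟨i, _, h⟩; exact ⟨i, h⟩
  · rintro ⟨j, h⟩
    by_cases hj : j < t.length
    · exact ⟨j, hj, h⟩
    · exfalso
      rw [List.drop_eq_nil_of_le (Nat.le_of_not_lt hj)] at h
      exact hk (List.prefix_nil.mp h)

theorem pv_tag_mem (text : String) (tag : String) :
    (tag ∈ (List.range (PySem.Str.lower text).toList.length).foldl (fun found i =>
      pvKeywordTag.foldl (fun found p =>
        if p.1.toList.isPrefixOf ((PySem.Str.lower text).toList.drop i) then PySem.Set.add found p.2 else found)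
        found) PySem.Set.empty) ↔
    ∃ p ∈ pvKeywordTag, p.2 = tag ∧ PySem.Str.isIn p.1 (PySem.Str.lower text) = true := by
  rw [pv_found_mem]
  constructor
  · rintro (h | ⟨i, hi, p, hp, hpre, he⟩)
    · exact absurd h (List.not_mem_nil)
    · refine ⟨p, hp, he, ?_⟩
      have := (PySem.Chars.exists_prefix_drop_iff_isIn _ _).mp ⟨i, hpre⟩
      simpa using this
  · rintro ⟨p, hp, he, hin⟩
    have hk : p.1.toList ≠ [] := by fin_cases hp <;> decide
    have h2 : PySem.Chars.isIn p.1.toList (PySem.Str.lower text).toList = true := by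
      simpa using hin
    rcases (PySem.Chars.exists_prefix_drop_iff_isIn _ _).mpr h2 with ⟨j, hj⟩
    rcases (pv_exists_lt p.1.toList (PySem.Str.lower text).toList hk).mpr ⟨j, hj⟩ with ⟨i, hi, hpre⟩
    exact Or.inr ⟨i, hi, p, hp, hpre, he⟩

theorem pv_contains_eq (text : String) (tag : String) :
    PySem.Set.contains
      ((List.range (PySem.Str.lower text).toList.length).foldl (fun found i =>
        pvKeywordTag.foldl (fun found p =>
          if p.1.toList.isPrefixOf ((PySem.Str.lower text).toList.drop i) then PySem.Set.add found p.2 else found)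
          found) PySem.Set.empty) tag = true ↔
    ∃ p ∈ pvKeywordTag, p.2 = tag ∧ PySem.Str.isIn p.1 (PySem.Str.lower text) = true := by
  rw [PySem.Set.contains_iff]
  exact pv_tag_mem text tag

theorem pv_b1 (text : String) :
    PySem.Set.contains
      ((List.range (PySem.Str.lower text).toList.length).foldl (fun found i =>
        pvKeywordTag.foldl (fun found p =>
          if p.1.toList.isPrefixOf ((PySem.Str.lower text).toList.drop i) then PySem.Set.add found p.2 else found)
          found) PySem.Set.empty) "vegetarian" =
    (PySem.Str.isIn "vegetarian" (PySem.Str.lower text) || PySem.Str.isIn "veggie" (PySem.Str.lower text)) := by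
  rw [Bool.eq_iff_iff, pv_contains_eq, Bool.or_eq_true]
  constructor
  · rintro ⟨p, hp, he, hin⟩
    fin_cases hp <;> simp_all
  · rintro (h | h)
    · exact ⟨("vegetarian", "vegetarian"), by simp [pvKeywordTag], rfl, h⟩
    · exact ⟨("veggie", "vegetarian"), by simp [pvKeywordTag], rfl, h⟩

theorem pv_b2 (text : String) :
    PySem.Set.contains
      ((List.range (PySem.Str.lower text).toList.length).foldl (fun found i =>
        pvKeywordTag.foldl (fun found p =>
          if p.1.toList.isPrefixOf ((PySem.Str.lower text).toList.drop i) then PySem.Set.add found p.2 else found)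
          found) PySem.Set.empty) "vegan" =
    PySem.Str.isIn "vegan" (PySem.Str.lower text) := by
  rw [Bool.eq_iff_iff, pv_contains_eq]
  constructor
  · rintro ⟨p, hp, he, hin⟩
    fin_cases hp <;> simp_all
  · intro h
    exact ⟨("vegan", "vegan"), by simp [pvKeywordTag], rfl, h⟩

theorem pv_b3 (text : String) :
    PySem.Set.contains
      ((List.range (PySem.Str.lower text).toList.length).foldl (fun found i =>
        pvKeywordTag.foldl (fun found p =>
          if p.1.toList.isPrefixOf ((PySem.Str.lower text).toList.drop i) then PySem.Set.add found p.2 else found)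
          found) PySem.Set.empty) "gluten-free" =
    (PySem.Str.isIn "gluten-free" (PySem.Str.lower text) || PySem.Str.isIn "gluten free" (PySem.Str.lower text)) := by
  rw [Bool.eq_iff_iff, pv_contains_eq, Bool.or_eq_true]
  constructor
  · rintro ⟨p, hp, he, hin⟩
    fin_cases hp <;> simp_all
  · rintro (h | h)
    · exact ⟨("gluten-free", "gluten-free"), by simp [pvKeywordTag], rfl, h⟩
    · exact ⟨("gluten free", "gluten-free"), by simp [pvKeywordTag], rfl, h⟩

theorem extract_dietary_tags_spec : Claim_equal_extract_dietary_tags := by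
  intro text _
  unfold Spec_extract_dietary_tags extract_dietary_tags extract_dietary_tags_alt
  simp only [List.filter_cons, List.filter_nil, List.any_cons, List.any_nil, Bool.or_false]
  rw [pv_b1, pv_b2, pv_b3]
  cases PySem.Str.isIn "vegetarian" (PySem.Str.lower text) <;>
  cases PySem.Str.isIn "veggie" (PySem.Str.lower text) <;>
  cases PySem.Str.isIn "vegan" (PySem.Str.lower text) <;>
  cases PySem.Str.isIn "gluten-free" (PySem.Str.lower text) <;>
  cases PySem.Str.isIn "gluten free" (PySem.Str.lower text) <;>
  rfl
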